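-- pv_equiv track=rewrite | github.com/nvth/split-bill-bot | bot.py | normalize_amount
-- ===== SOURCE A (Python) =====
-- def normalize_amount(raw: str) -> str:
--     if not raw:
--         return ''
--     cleaned = ''.join(ch for ch in raw if ch.isdigit() or ch == '.')
--     if not cleaned:
--         return ''
--     parts = cleaned.split('.')
--     if len(parts) > 2:
--         return ''
--     if len(parts) == 2 and len(parts[1]) > 2:
--         return ''
--     return cleaned.lstrip('0') or '0'
-- ===== SOURCE B (Python) =====
-- def normalize_amount(raw: str) -> str:
--     # Single left-to-right scan driven by a tiny state machine:
--     # frac == -1 means "no decimal dot seen yet", frac >= 0 counts fractional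
--     # digits seen so far.  Invalid inputs are rejected the moment the second
--     # dot or the third fractional digit appears (early return), and leading
--     # zeros are never stored at all: a '0' digit is skipped while the output
--     # buffer is still empty.  No cleaned string, no split, no lstrip.
--     out = []
--     frac = -1
--     kept_any = False
--     for ch in raw:
--         if ch == '.':
--             if frac >= 0:
--                 return ''          # second dot: reject immediately
--             frac = 0
--             out.append('.')
--             kept_any = True
--         elif '0' <= ch <= '9':
--             if frac >= 0:
--                 if frac == 2:
--                     return ''      # third fractional digit: reject immediately
--                 frac += 1
--             kept_any = True
--             if out or ch != '0':
--                 out.append(ch)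
--     if not kept_any:
--         return ''
--     return ''.join(out) or '0'
-- ===== Notes on version B (the rewrite author's own statement) =====
-- stated objective: alternative
-- what changed: Replaces A's build-cleaned-string / split-on-dot / index-parts / lstrip pipeline by a small state machine in one scan: it never materializes the cleaned string or a parts list, rejects with an early return the moment a second dot or a third fractional digit appears, and drops leading zeros on the fly instead of lstrip at the end.
import Mathlib
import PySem

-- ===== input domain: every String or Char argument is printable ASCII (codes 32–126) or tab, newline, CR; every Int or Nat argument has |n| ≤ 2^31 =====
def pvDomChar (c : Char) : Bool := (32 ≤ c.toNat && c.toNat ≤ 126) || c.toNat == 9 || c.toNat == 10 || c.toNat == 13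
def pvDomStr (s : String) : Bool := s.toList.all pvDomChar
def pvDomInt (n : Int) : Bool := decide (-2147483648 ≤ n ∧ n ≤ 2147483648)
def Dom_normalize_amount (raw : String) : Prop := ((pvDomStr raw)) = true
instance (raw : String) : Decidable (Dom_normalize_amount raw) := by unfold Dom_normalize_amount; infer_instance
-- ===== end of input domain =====

-- B replaces A's build-cleaned / split-on-dot / index-parts / lstrip pipeline with a
-- one-scan state machine that rejects early and strips leading zeros on the fly;
-- an alternative of the same asymptotic cost.


-- ===== PORT A =====
-- ''.join of the filtered single characters is the filter of the character list;
-- cleaned.lstrip('0') is dropWhile (== '0') (exact: lstrip with an explicit char set);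
-- parts[1] is only read under parts.length = 2, so pyGet? is some and getD is exact there.
def normalize_amount (raw : String) : String :=
  if raw = "" then "" else
  let cleaned := raw.toList.filter (fun ch => PySem.Chars.isdigit ch || ch == '.')
  if cleaned = [] then "" else
  let parts := PySem.Chars.splitOn cleaned ['.']
  if parts.length > 2 then "" else
  if parts.length = 2 ∧ ((PySem.List.pyGet? parts 1).getD []).length > 2 then "" else
  let r := cleaned.dropWhile (fun c => c == '0')
  if r = [] then "0" else String.mk r

-- ===== PORT B =====
-- the loop of Source B: out = kept chars with leading zeros already dropped,
-- frac = -1 before the dot / number of fractional digits after it, kept_any flag;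
-- the two 'return ""' early exits are the two "" branches.
def goB : List Char → List Char → Int → Bool → String
  | [], out, _, kept =>
      if kept = false then "" else
      if out = [] then "0" else String.mk out
  | ch :: rest, out, frac, kept =>
      if ch == '.' then
        if frac ≥ 0 then ""
        else goB rest (out ++ ['.']) 0 true
      else if '0' ≤ ch ∧ ch ≤ '9' then
        if frac ≥ 0 then
          if frac = 2 then ""
          else goB rest (if out ≠ [] ∨ ch ≠ '0' then out ++ [ch] else out) (frac + 1) true
        else goB rest (if out ≠ [] ∨ ch ≠ '0' then out ++ [ch] else out) frac true
      else goB rest out frac kept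

def normalize_amount_alt (raw : String) : String := goB raw.toList [] (-1) false

-- ===== PRECONDITION & SPEC =====
def Spec_normalize_amount (raw : String) (out : String) : Prop := out = normalize_amount_alt raw
instance (raw : String) (out : String) : Decidable (Spec_normalize_amount raw out) := by unfold Spec_normalize_amount; infer_instance

-- ===== CLAIM (what is proved, stated in full; the proofs are below) =====
def Claim_equal_normalize_amount : Prop := ∀ (raw : String), Dom_normalize_amount raw → Spec_normalize_amount raw (normalize_amount raw)

-- ===== LEMMAS AND PROOFS =====

def pvP (ch : Char) : Bool := PySem.Chars.isdigit ch || ch == '.'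

theorem pvP_digit {ch : Char} (h : '0' ≤ ch ∧ ch ≤ '9') : pvP ch = true := by
  simp [pvP, PySem.Chars.isdigit]
  exact Or.inl h

theorem pvP_other {ch : Char} (hd : ¬ ('0' ≤ ch ∧ ch ≤ '9')) (hc : ¬ ch = '.') :
    pvP ch = false := by
  simp [pvP, PySem.Chars.isdigit, hc]
  intro h1
  by_contra h2
  exact hd ⟨h1, not_lt.mp h2⟩


def split1 (pre : List Char) : List Char → List (List Char)
  | [] => [pre]
  | c :: rest => if c = '.' then pre :: split1 [] rest else split1 (pre ++ [c]) rest

-- helpers about takeWhile over an append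
theorem tw_all {q : Char → Bool} {xs : List Char} (ys : List Char)
    (h : ∀ x ∈ xs, q x = true) : (xs ++ ys).takeWhile q = xs ++ ys.takeWhile q := by
  induction xs with
  | nil => simp
  | cons a l ih =>
    simp only [List.cons_append, List.takeWhile_cons, h a (by simp)]
    rw [ih (fun x hx => h x (by simp [hx]))]
    simp

theorem tw_stop {q : Char → Bool} {xs : List Char} (ys : List Char)
    (h : ∃ x ∈ xs, q x = false) : (xs ++ ys).takeWhile q = xs.takeWhile q := by
  induction xs with
  | nil => simp at h
  | cons a l ih =>
    simp only [List.cons_append, List.takeWhile_cons]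
    rcases h with ⟨x, hx, hqx⟩
    rcases List.mem_cons.mp hx with rfl | hx'
    · simp [hqx]
    · by_cases ha : q a
      · simp only [ha, ite_true]
        rw [ih ⟨x, hx', hqx⟩]
      · simp [ha]

def pvAfter (s : List Char) : List Char := s.reverse.takeWhile (fun c => !(c == '.'))

theorem split1_length (s : List Char) : ∀ pre, (split1 pre s).length = s.count '.' + 1 := by
  induction s with
  | nil => intro pre; simp [split1]
  | cons c rest ih =>
    intro pre
    by_cases hc : c = '.'
    · subst hc; simp [split1, ih, List.count_cons]
    · simp [split1, hc, ih, List.count_cons, Ne.symm hc]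

theorem split1_no_dot (s : List Char) : ∀ pre, s.count '.' = 0 → split1 pre s = [pre ++ s] := by
  induction s with
  | nil => intro pre _; simp [split1]
  | cons c rest ih =>
    intro pre h
    by_cases hc : c = '.'
    · subst hc; simp [List.count_cons] at h
    · rw [List.count_cons] at h
      simp [split1, hc, ih (pre ++ [c]) (by omega)]

theorem after_cons_no_dot (c : Char) (rest : List Char) (h : rest.count '.' = 0) :
    pvAfter (c :: rest) = if c = '.' then rest.reverse else rest.reverse ++ [c] := by
  have hall : ∀ x ∈ rest.reverse, (fun c => !(c == '.')) x = true := by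
    intro x hx
    simp only [Bool.not_eq_eq_eq_not, Bool.not_true, beq_eq_false_iff_ne, ne_eq]
    intro hxe; subst hxe
    exact absurd (List.count_pos_iff.mpr (List.mem_reverse.mp hx)) (by omega)
  unfold pvAfter
  simp only [List.reverse_cons]
  by_cases hc : c = '.'
  · subst hc
    rw [tw_all _ hall]; simp
  · rw [tw_all _ hall]; simp [hc]

theorem after_cons_dot_mem (c : Char) (rest : List Char) (h : '.' ∈ rest) :
    pvAfter (c :: rest) = pvAfter rest := by
  unfold pvAfter
  simp only [List.reverse_cons]
  rw [tw_stop _ ⟨'.', by simp [h], by simp⟩]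


theorem split1_one_dot (s : List Char) : ∀ pre, s.count '.' = 1 →
    ∃ a, split1 pre s = [a, (pvAfter s).reverse] := by
  induction s with
  | nil => intro pre h; simp at h
  | cons c rest ih =>
    intro pre h
    rw [List.count_cons] at h
    by_cases hc : c = '.'
    · subst hc
      simp only [beq_self_eq_true, if_pos, reduceIte] at h
      have hr : rest.count '.' = 0 := by omega
      refine ⟨pre, ?_⟩
      simp only [split1, if_pos rfl, split1_no_dot rest [] hr, List.nil_append]
      rw [after_cons_no_dot '.' rest hr]
      simp
    · have h1 : rest.count '.' = 1 := by simpa [hc, Ne.symm hc] using h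
      obtain ⟨a, ha⟩ := ih (pre ++ [c]) h1
      refine ⟨a, ?_⟩
      have hm : '.' ∈ rest := List.count_pos_iff.mp (by omega)
      simp only [split1, hc, if_neg, reduceIte, ha, after_cons_dot_mem c rest hm]

theorem go_char (l : List Char) : ∀ (fuel : Nat) (cur : List Char) (acc : List (List Char)), l.length < fuel →
    PySem.Chars.splitOn.go ['.'] fuel l cur acc = acc.reverse ++ split1 cur.reverse l := by
  induction l with
  | nil =>
    intro fuel cur acc h
    match fuel, h with
    | n+1, _ => simp [PySem.Chars.splitOn.go, split1]
  | cons c rest ih =>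
    intro fuel cur acc h
    match fuel, h with
    | n+1, h =>
      have hn : rest.length < n := by simpa using Nat.lt_of_succ_lt_succ h
      rw [PySem.Chars.splitOn.go.eq_def]
      dsimp only
      by_cases hc : c = '.'
      · subst hc
        have hp : List.isPrefixOf ['.'] ('.' :: rest) = true := by
          simp [List.isPrefixOf]
        rw [if_pos hp]
        show PySem.Chars.splitOn.go ['.'] n rest [] (cur.reverse :: acc) = _
        rw [ih n [] (cur.reverse :: acc) hn]
        simp [split1]
      · have hp : List.isPrefixOf ['.'] (c :: rest) = false := by
          simp [List.isPrefixOf]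
          exact fun h => hc h.symm
        rw [if_neg (by simp [hp])]
        rw [ih n (c :: cur) acc hn]
        simp [split1, hc]

theorem splitOn_eq (s : List Char) : PySem.Chars.splitOn s ['.'] = split1 [] s := by
  unfold PySem.Chars.splitOn
  rw [go_char s (s.length + 1) [] [] (by omega)]
  simp


-- ===== B-side characterisation =====

def pvFin (out F : List Char) (kept : Bool) : String :=
  if kept = false ∧ F = [] then "" else
  if out ++ (if out = [] then F.dropWhile (fun c => c == '0') else F) = [] then "0"
  else String.mk (out ++ (if out = [] then F.dropWhile (fun c => c == '0') else F))

def pvRes (l out : List Char) (frac : Int) (kept : Bool) : String :=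
  if frac ≥ 0 then
    if (l.filter pvP).count '.' ≥ 1 then ""
    else if frac + (l.filter pvP).length > 2 then ""
    else pvFin out (l.filter pvP) kept
  else
    if (l.filter pvP).count '.' ≥ 2 then ""
    else if (l.filter pvP).count '.' = 1 ∧ (pvAfter (l.filter pvP)).length > 2 then ""
    else pvFin out (l.filter pvP) kept

theorem goB_eq (l : List Char) : ∀ (out : List Char) (frac : Int) (kept : Bool),
    frac ≤ 2 → goB l out frac kept = pvRes l out frac kept := by
  induction l with
  | nil =>
    intro out frac kept hle
    unfold goB pvRes pvFin
    simp only [List.filter_nil, List.count_nil, List.length_nil, List.dropWhile_nil]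
    have hgt : ¬ (frac + ((0:Nat):Int) > 2) := by push_cast; omega
    have h1 : ¬ ((0:Nat) ≥ 1) := by omega
    have h2 : ¬ ((0:Nat) ≥ 2) := by omega
    have h3 : ¬ ((0:Nat) = 1 ∧ (pvAfter ([]:List Char)).length > 2) := by rintro ⟨h,_⟩; omega
    by_cases hk : kept = false
    · simp only [if_pos hk]
      by_cases hf : frac ≥ 0
      · simp only [if_pos hf, if_neg h1, if_neg hgt, if_pos (show kept = false ∧ True from ⟨hk, trivial⟩)]
      · simp only [if_neg hf, if_neg h2, if_neg h3, if_pos (show kept = false ∧ True from ⟨hk, trivial⟩)]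
    · simp only [if_neg hk]
      have hnp : ¬ (kept = false ∧ True) := by rintro ⟨h,_⟩; exact hk h
      by_cases hf : frac ≥ 0
      · simp only [if_pos hf, if_neg h1, if_neg hgt, if_neg hnp]
        by_cases ho : out = [] <;> simp [ho]
      · simp only [if_neg hf, if_neg h2, if_neg h3, if_neg hnp]
        by_cases ho : out = [] <;> simp [ho]
  | cons ch rest ih =>
    intro out frac kept hle
    by_cases hc : ch = '.'
    · subst hc
      have hF : ('.' :: rest).filter pvP = '.' :: rest.filter pvP := by simp [pvP]
      by_cases hf : frac ≥ 0
      · -- second dot: both sides ""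
        unfold goB
        simp only [if_pos (show ('.' == '.') = true from rfl), if_pos hf]
        unfold pvRes
        rw [hF, if_pos hf,
            if_pos (show List.count '.' ('.' :: rest.filter pvP) ≥ 1 by simp [List.count_cons])]
      · unfold goB
        simp only [if_pos (show ('.' == '.') = true from rfl), if_neg hf]
        rw [ih (out ++ ['.']) 0 true (by omega)]
        unfold pvRes pvFin
        rw [hF]
        simp only [if_pos (show (0:Int) ≥ 0 by omega), if_neg hf]
        have hcnt : List.count '.' ('.' :: (rest.filter pvP)) = (rest.filter pvP).count '.' + 1 := by
          simp [List.count_cons]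
        rw [hcnt]
        by_cases h1 : (rest.filter pvP).count '.' ≥ 1
        · simp only [if_pos h1, if_pos (show (rest.filter pvP).count '.' + 1 ≥ 2 by omega)]
        · have h0 : (rest.filter pvP).count '.' = 0 := by omega
          have hlen : (pvAfter ('.' :: (rest.filter pvP))).length = (rest.filter pvP).length := by
            rw [after_cons_no_dot '.' (rest.filter pvP) h0]; simp
          simp only [if_neg h1, if_neg (show ¬ ((rest.filter pvP).count '.' + 1 ≥ 2) by omega)]
          by_cases h2 : (0:Int) + ((rest.filter pvP).length : Int) > 2
          · simp only [if_pos h2,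
                if_pos (show (rest.filter pvP).count '.' + 1 = 1 ∧ (pvAfter ('.' :: (rest.filter pvP))).length > 2 from
                  ⟨by omega, by rw [hlen]; omega⟩)]
          · simp only [if_neg h2,
                if_neg (show ¬ ((rest.filter pvP).count '.' + 1 = 1 ∧ (pvAfter ('.' :: (rest.filter pvP))).length > 2) by
                  rintro ⟨_, hg⟩; rw [hlen] at hg; omega)]
            simp only [if_neg (show ¬ (true = false ∧ (rest.filter pvP) = []) by rintro ⟨h, _⟩; cases h),
                if_neg (show ¬ (kept = false ∧ '.' :: (rest.filter pvP) = []) by rintro ⟨_, h⟩; cases h)]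
            have hdw : List.dropWhile (fun c => c == '0') ('.' :: (rest.filter pvP)) = '.' :: (rest.filter pvP) := by
              rw [List.dropWhile_cons]; simp
            by_cases ho : out = []
            · subst ho; simp [hdw]
            · simp [ho]
    · have hbe : ¬ ((ch == '.') = true) := by simpa using hc
      by_cases hd : '0' ≤ ch ∧ ch ≤ '9'
      · have hpv : pvP ch = true := pvP_digit hd
        have hF : (ch :: rest).filter pvP = ch :: rest.filter pvP := by simp [hpv]
        have hbf : (ch == '.') = false := by simpa using hc
        have hcnt : List.count '.' (ch :: rest.filter pvP) = (rest.filter pvP).count '.' := by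
          simp [List.count_cons, hbf]
        have houtF : (if out ≠ [] ∨ ch ≠ '0' then out ++ [ch] else out) ++
              (if (if out ≠ [] ∨ ch ≠ '0' then out ++ [ch] else out) = []
                then (rest.filter pvP).dropWhile (fun c => c == '0') else (rest.filter pvP))
            = out ++ (if out = [] then (ch :: (rest.filter pvP)).dropWhile (fun c => c == '0') else ch :: (rest.filter pvP)) := by
          by_cases ho : out = []
          · subst ho
            by_cases h0 : ch = '0'
            · subst h0
              simp only [if_neg (show ¬ (([] : List Char) ≠ [] ∨ ('0':Char) ≠ '0') by simp)]
              simp [List.dropWhile_cons]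
            · simp only [if_pos (Or.inr h0)]
              have hb : (ch == '0') = false := by simpa using h0
              simp [List.dropWhile_cons, hb]
          · simp only [if_pos (Or.inl ho)]
            simp [ho]
        by_cases hf : frac ≥ 0
        · by_cases h2 : frac = 2
          · subst h2
            unfold goB
            simp only [if_neg hbe, if_pos hd, if_pos hf]
            unfold pvRes
            rw [hF, if_pos hf]
            by_cases h1 : List.count '.' (ch :: (rest.filter pvP)) ≥ 1
            · simp only [if_pos h1]
              simp
            · simp only [if_neg h1,
                  if_pos (show (2:Int) + ((ch :: (rest.filter pvP)).length : Int) > 2 by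
                    have : (ch :: (rest.filter pvP)).length = (rest.filter pvP).length + 1 := rfl
                    rw [this]; push_cast; omega)]
              simp
          · unfold goB
            simp only [if_neg hbe, if_pos hd, if_pos hf, if_neg h2]
            rw [ih _ (frac + 1) true (by omega)]
            unfold pvRes pvFin
            rw [hF, if_pos (show frac + 1 ≥ 0 by omega), if_pos hf, hcnt]
            by_cases h1 : (rest.filter pvP).count '.' ≥ 1
            · simp only [if_pos h1]
            · simp only [if_neg h1]
              have hlc : ((ch :: (rest.filter pvP)).length : Int) = ((rest.filter pvP).length : Int) + 1 := by
                have : (ch :: (rest.filter pvP)).length = (rest.filter pvP).length + 1 := rfl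
                rw [this]; push_cast; ring
              by_cases hgt : frac + 1 + ((rest.filter pvP).length : Int) > 2
              · simp only [if_pos hgt,
                    if_pos (show frac + ((ch :: (rest.filter pvP)).length : Int) > 2 by rw [hlc]; omega)]
              · simp only [if_neg hgt,
                    if_neg (show ¬ (frac + ((ch :: (rest.filter pvP)).length : Int) > 2) by rw [hlc]; omega)]
                simp only [if_neg (show ¬ (true = false ∧ (rest.filter pvP) = []) by rintro ⟨h, _⟩; cases h),
                    if_neg (show ¬ (kept = false ∧ ch :: (rest.filter pvP) = []) by rintro ⟨_, h⟩; cases h)]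
                rw [houtF]
        · unfold goB
          simp only [if_neg hbe, if_pos hd, if_neg hf]
          rw [ih _ frac true hle]
          unfold pvRes pvFin
          rw [hF, if_neg hf, if_neg hf, hcnt]
          by_cases h1 : (rest.filter pvP).count '.' ≥ 2
          · simp only [if_pos h1]
          · simp only [if_neg h1]
            by_cases hone : (rest.filter pvP).count '.' = 1
            · have hAft : pvAfter (ch :: (rest.filter pvP)) = pvAfter (rest.filter pvP) :=
                after_cons_dot_mem ch (rest.filter pvP) (List.count_pos_iff.mp (by omega))
              rw [hAft]
              by_cases hgt : (pvAfter (rest.filter pvP)).length > 2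
              · simp only [if_pos (show (rest.filter pvP).count '.' = 1 ∧ (pvAfter (rest.filter pvP)).length > 2 from ⟨hone, hgt⟩)]
              · simp only [if_neg (show ¬ ((rest.filter pvP).count '.' = 1 ∧ (pvAfter (rest.filter pvP)).length > 2) by
                      rintro ⟨_, h⟩; omega)]
                simp only [if_neg (show ¬ (true = false ∧ (rest.filter pvP) = []) by rintro ⟨h, _⟩; cases h),
                    if_neg (show ¬ (kept = false ∧ ch :: (rest.filter pvP) = []) by rintro ⟨_, h⟩; cases h)]
                rw [houtF]
            · simp only [if_neg (show ¬ ((rest.filter pvP).count '.' = 1 ∧ (pvAfter (rest.filter pvP)).length > 2) by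
                    rintro ⟨h, _⟩; exact hone h),
                  if_neg (show ¬ ((rest.filter pvP).count '.' = 1 ∧ (pvAfter (ch :: (rest.filter pvP))).length > 2) by
                    rintro ⟨h, _⟩; exact hone h)]
              simp only [if_neg (show ¬ (true = false ∧ (rest.filter pvP) = []) by rintro ⟨h, _⟩; cases h),
                  if_neg (show ¬ (kept = false ∧ ch :: (rest.filter pvP) = []) by rintro ⟨_, h⟩; cases h)]
              rw [houtF]
      · have hpv : pvP ch = false := pvP_other hd hc
        have hF : (ch :: rest).filter pvP = rest.filter pvP := by simp [hpv]
        unfold goB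
        simp only [if_neg hbe, if_neg hd]
        rw [ih out frac kept hle]
        unfold pvRes
        rw [hF]

theorem main_thm (raw : String) : normalize_amount raw = normalize_amount_alt raw := by
  by_cases hr : raw = ""
  · subst hr; rfl
  · unfold normalize_amount normalize_amount_alt
    rw [goB_eq raw.toList [] (-1) false (by norm_num)]
    rw [if_neg hr]
    unfold pvRes pvFin
    rw [if_neg (show ¬ ((-1:Int) ≥ 0) by norm_num)]
    simp only [show (fun ch => PySem.Chars.isdigit ch || ch == '.') = pvP from rfl]
    set F := raw.toList.filter pvP with hFdef
    by_cases hFe : F = []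
    · rw [if_pos hFe, hFe]
      simp [pvAfter]
    · rw [if_neg hFe, splitOn_eq F, split1_length F []]
      by_cases h2 : F.count '.' ≥ 2
      · rw [if_pos (show F.count '.' + 1 > 2 by omega), if_pos h2]
      · rw [if_neg (show ¬ (F.count '.' + 1 > 2) by omega), if_neg h2]
        by_cases h1 : F.count '.' = 1
        · obtain ⟨a, ha⟩ := split1_one_dot F [] h1
          rw [ha]
          have hget : (PySem.List.pyGet? [a, (pvAfter F).reverse] 1).getD [] = (pvAfter F).reverse := by
            rfl
          rw [hget]
          simp only [List.length_cons, List.length_reverse]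
          by_cases hT : (pvAfter F).length > 2
          · rw [if_pos (show F.count '.' + 1 = 2 ∧ (pvAfter F).length > 2 from ⟨by omega, hT⟩),
                if_pos (show F.count '.' = 1 ∧ (pvAfter F).length > 2 from ⟨h1, hT⟩)]
          · rw [if_neg (show ¬ (F.count '.' + 1 = 2 ∧ (pvAfter F).length > 2) by
                  rintro ⟨_, h⟩; omega),
                if_neg (show ¬ (F.count '.' = 1 ∧ (pvAfter F).length > 2) by
                  rintro ⟨_, h⟩; omega)]
            simp [hFe]
        · rw [if_neg (show ¬ (F.count '.' + 1 = 2 ∧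
                  ((PySem.List.pyGet? (split1 [] F) 1).getD []).length > 2) by
                rintro ⟨h, _⟩; omega),
              if_neg (show ¬ (F.count '.' = 1 ∧ (pvAfter F).length > 2) by
                rintro ⟨h, _⟩; exact h1 h)]
          simp [hFe]

-- ===== VERDICT (by name: the statement is the Claim_ definition above) =====
theorem normalize_amount_spec : Claim_equal_normalize_amount := by
  intro raw _
  unfold Spec_normalize_amount
  exact main_thm raw
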